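-- pv_equiv track=rewrite | github.com/josephHelfenbein/csc-36000-group-2 | primary_node_edited.py | split_into_slices
-- ===== SOURCE A (Python) =====
-- from typing import Any, Dict, List, Tuple
--
-- def split_into_slices(low: int, high: int, n: int) -> List[Tuple[int, int]]:
--     if n <= 1:
--         return [(low, high)]
--     step = (high - low + 1) // n
--     slices = []
--     current = low
--     for i in range(n):
--         nxt = current + step - 1
--         if i == n - 1:
--             nxt = high
--         slices.append((current, nxt))
--         current = nxt + 1
--     return slices
-- ===== SOURCE B (Python) =====
-- def split_into_slices(low, high, n):
--     if n <= 1: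
--         return [(low, high)]
--     step = (high - low + 1) // n
--     cuts = [low + i * step for i in range(n)] + [high + 1]
--     return [(a, b - 1) for a, b in zip(cuts, cuts[1:])]
-- ===== Notes on version B (the rewrite author's own statement) =====
-- stated objective: alternative
-- what changed: Replaced the stateful loop carrying a running `current` accumulator and a last-iteration branch with a two-stage boundary construction: build the list of cut points once, then zip adjacent cuts into slices, eliminating both the accumulator and the per-index i==n-1 special case.
import Mathlib
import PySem

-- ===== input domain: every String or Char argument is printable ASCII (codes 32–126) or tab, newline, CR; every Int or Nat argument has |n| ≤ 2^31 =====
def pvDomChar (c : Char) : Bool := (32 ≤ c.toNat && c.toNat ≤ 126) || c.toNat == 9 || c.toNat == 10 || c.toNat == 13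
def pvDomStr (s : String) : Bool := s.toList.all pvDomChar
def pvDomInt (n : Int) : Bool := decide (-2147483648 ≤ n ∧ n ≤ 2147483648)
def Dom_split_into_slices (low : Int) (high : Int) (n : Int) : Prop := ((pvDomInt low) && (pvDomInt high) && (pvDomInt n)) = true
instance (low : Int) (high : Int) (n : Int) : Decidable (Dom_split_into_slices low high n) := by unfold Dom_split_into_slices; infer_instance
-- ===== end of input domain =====

-- B builds the list of cut points once and zips adjacent cuts into slices, removing A's
-- running `current` accumulator and its last-iteration branch (objective: alternative).

-- ===== PORT A =====
def split_into_slices (low : Int) (high : Int) (n : Int) : List (Int × Int) :=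
  if n ≤ 1 then [(low, high)]
  else
    let step := PySem.Int.floordiv (high - low + 1) n
    ((PySem.List.pyRange 0 n 1).foldl
      (fun (s : List (Int × Int) × Int) i =>
        let nxt := s.2 + step - 1
        let nxt := if i == n - 1 then high else nxt
        (s.1 ++ [(s.2, nxt)], nxt + 1))
      ([], low)).1

-- ===== PORT B =====
def split_into_slices_alt (low : Int) (high : Int) (n : Int) : List (Int × Int) :=
  if n ≤ 1 then [(low, high)]
  else
    let step := PySem.Int.floordiv (high - low + 1) n
    let cuts := (PySem.List.pyRange 0 n 1).map (fun i => low + i * step) ++ [high + 1]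
    (cuts.zip cuts.tail).map (fun p => (p.1, p.2 - 1))

-- ===== PRECONDITION & SPEC =====
def Spec_split_into_slices (low : Int) (high : Int) (n : Int) (out : List (Int × Int)) : Prop := out = split_into_slices_alt low high n
instance (low : Int) (high : Int) (n : Int) (out : List (Int × Int)) : Decidable (Spec_split_into_slices low high n out) := by unfold Spec_split_into_slices; infer_instance

-- ===== CLAIM (what is proved, stated in full; the proofs are below) =====
def Claim_equal_split_into_slices : Prop := ∀ (low : Int) (high : Int) (n : Int), Dom_split_into_slices low high n → Spec_split_into_slices low high n (split_into_slices low high n)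

-- ===== LEMMAS AND PROOFS =====

-- A's loop invariant: entering iteration i with current = low + i*step, the fold produces
-- the closed-form slices for the remaining indices, appended to the accumulator.
theorem split_loop_eq (low high n step : Int) :
    ∀ (k : Nat) (i : Int) (acc : List (Int × Int)), (n - i).toNat = k →
      ((PySem.List.pyRange i n 1).foldl
        (fun (s : List (Int × Int) × Int) j =>
          let nxt := s.2 + step - 1
          let nxt := if j == n - 1 then high else nxt
          (s.1 ++ [(s.2, nxt)], nxt + 1))
        (acc, low + i * step)).1
      = acc ++ (PySem.List.pyRange i n 1).map
          (fun j => (low + j * step, if j == n - 1 then high else low + (j + 1) * step - 1)) := by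
  intro k
  induction k with
  | zero =>
    intro i acc hk
    have h : n ≤ i := by omega
    simp [PySem.List.pyRange_one_eq_nil h]
  | succ k ih =>
    intro i acc hk
    have h : i < n := by omega
    rw [PySem.List.pyRange_one_cons h]
    simp only [List.foldl_cons, List.map_cons]
    by_cases he : i = n - 1
    · have hb : (i == n - 1) = true := by simp [he]
      have hnil : PySem.List.pyRange (i + 1) n 1 = [] :=
        PySem.List.pyRange_one_eq_nil (by omega)
      simp [hb, hnil]
    · have hb : (i == n - 1) = false := by simp [he]
      have hend : low + i * step + step - 1 = low + (i + 1) * step - 1 := by ring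
      have hcur : low + i * step + step - 1 + 1 = low + (i + 1) * step := by ring
      simp only [hb, Bool.false_eq_true, if_false]
      rw [hcur, hend, ih (i + 1) (acc ++ [(low + i * step, low + (i + 1) * step - 1)]) (by omega)]
      simp

-- B's zip of adjacent cut points equals the same closed form, from any starting index i.
theorem zip_cuts_eq (low high n step : Int) :
    ∀ (k : Nat) (i : Int), (n - i).toNat = k →
      ((((PySem.List.pyRange i n 1).map (fun j => low + j * step) ++ [high + 1]).zip
        ((PySem.List.pyRange i n 1).map (fun j => low + j * step) ++ [high + 1]).tail).map
        (fun p => (p.1, p.2 - 1)))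
      = (PySem.List.pyRange i n 1).map
          (fun j => (low + j * step, if j == n - 1 then high else low + (j + 1) * step - 1)) := by
  intro k
  induction k with
  | zero =>
    intro i hk
    have h : n ≤ i := by omega
    simp [PySem.List.pyRange_one_eq_nil h]
  | succ k ih =>
    intro i hk
    have h : i < n := by omega
    rw [PySem.List.pyRange_one_cons h]
    by_cases he : i = n - 1
    · have hb : (i == n - 1) = true := by simp [he]
      have hnil : PySem.List.pyRange (i + 1) n 1 = [] :=
        PySem.List.pyRange_one_eq_nil (by omega)
      simp [hnil, he]
    · have hb : (i == n - 1) = false := by simp [he]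
      have h2 : i + 1 < n := by omega
      have hcons : PySem.List.pyRange (i + 1) n 1 = (i + 1) :: PySem.List.pyRange (i + 1 + 1) n 1 :=
        PySem.List.pyRange_one_cons h2
      have ih' := ih (i + 1) (by omega)
      rw [hcons] at ih' ⊢
      simp only [List.map_cons, List.cons_append, List.tail_cons, List.zip_cons_cons] at ih' ⊢
      simp only [hb, Bool.false_eq_true, if_false]
      rw [ih']

-- ===== VERDICT (by name: the statement is the Claim_ definition above) =====
theorem split_into_slices_spec : Claim_equal_split_into_slices := by
  intro low high n _
  unfold Spec_split_into_slices split_into_slices split_into_slices_alt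
  by_cases h : n ≤ 1
  · simp [h]
  · simp only [h, if_false]
    have hA := split_loop_eq low high n (PySem.Int.floordiv (high - low + 1) n)
      n.toNat 0 [] (by omega)
    have hB := zip_cuts_eq low high n (PySem.Int.floordiv (high - low + 1) n)
      n.toNat 0 (by omega)
    simpa [hB] using hA
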